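-- pv_equiv track=rewrite | github.com/Sderenski/CSC250---Algo-1 | CodeWars/FoldAnArray.py | fold_array
-- ===== SOURCE A (Python) =====
-- def fold_array(array, runs):
--     actRun = 0
--     while actRun < runs:
--         #--------
--         # Variables
--         offset = 0
--         firstHalf = []
--         secHalf = []
--
--         #-----------------------
--         # Spliting the arrays
--         if len(array) % 2 != 0:
--             offset += 1
--         for i in range(0, len(array)//2 + offset):
--             firstHalf.append(array[i])
--         for j in range(len(array)//2 + offset, len(array)):
--             secHalf.insert(0, array[j])
--
--         #-------------------------
--         # Putting back together
--         array = []
--         for r in range(0, len(secHalf)):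
--             array.append(firstHalf[r] + secHalf[r])
--         if offset != 0:
--             array.append(firstHalf[len(firstHalf) - 1])
--
--         actRun += 1
--
--     return array
-- ===== SOURCE B (Python) =====
-- def _fold_once(a):
--     # peel matching ends off a working copy, building the output left to right
--     a = list(a)
--     out = []
--     while len(a) >= 2:
--         last = a.pop()
--         first = a.pop(0)
--         out.append(first + last)
--     return out + a
--
--
-- def fold_array(array, runs):
--     r = runs
--     while r > 0:
--         if len(array) < 2:
--             break  # folding a list of length <= 1 changes nothing
--         array = _fold_once(array)
--         r -= 1
--     return array
-- ===== Notes on version B (the rewrite author's own statement) =====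
-- stated objective: alternative
-- what changed: B keeps no half-lists and no indices: each fold peels the two current end elements off a shrinking working list (pop()/pop(0)) and appends their sum, and the runs loop exits early once the list has length <= 1 (further folds are identity), instead of A's three indexed passes building firstHalf and a reversed secHalf per run.
import Mathlib
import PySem

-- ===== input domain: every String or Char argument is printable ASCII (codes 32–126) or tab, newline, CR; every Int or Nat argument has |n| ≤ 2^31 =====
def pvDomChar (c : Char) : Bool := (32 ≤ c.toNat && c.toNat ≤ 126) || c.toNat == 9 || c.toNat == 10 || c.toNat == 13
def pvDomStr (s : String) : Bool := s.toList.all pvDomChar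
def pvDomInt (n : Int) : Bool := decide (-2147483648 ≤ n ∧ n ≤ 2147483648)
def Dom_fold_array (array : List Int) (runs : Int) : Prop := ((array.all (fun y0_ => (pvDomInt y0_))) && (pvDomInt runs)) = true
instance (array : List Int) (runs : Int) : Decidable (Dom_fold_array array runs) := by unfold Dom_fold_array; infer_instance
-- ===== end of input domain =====

-- B folds by peeling matching end elements off a shrinking working list (pop() / pop(0)),
-- keeping no half-lists and no index arithmetic, and stops early once the list can no longer
-- change; objective: alternative decomposition (deque-style peeling vs A's indexed half-lists).

-- ===== PORT A =====
-- one iteration of A's while-loop body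
def foldA_step (array : List Int) : List Int :=
  let offset : Int := if PySem.Int.mod (array.length : Int) 2 ≠ 0 then 1 else 0
  let half : Int := PySem.Int.floordiv (array.length : Int) 2 + offset
  let firstHalf : List Int :=
    (PySem.List.pyRange 0 half 1).foldl (fun acc i => acc ++ [PySem.List.pyGetD array i 0]) []
  let secHalf : List Int :=
    (PySem.List.pyRange half (array.length : Int) 1).foldl
      (fun acc j => PySem.List.pyGetD array j 0 :: acc) []
  let res : List Int :=
    (PySem.List.pyRange 0 (secHalf.length : Int) 1).foldl
      (fun acc r => acc ++ [PySem.List.pyGetD firstHalf r 0 + PySem.List.pyGetD secHalf r 0]) []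
  if offset ≠ 0 then res ++ [PySem.List.pyGetD firstHalf ((firstHalf.length : Int) - 1) 0] else res

-- 'while actRun < runs' runs exactly runs.toNat times (actRun counts up from 0)
def foldA_loop : List Int → Nat → List Int
  | arr, 0 => arr
  | arr, Nat.succ k => foldA_loop (foldA_step arr) k

def fold_array (array : List Int) (runs : Int) : List Int :=
  foldA_loop array runs.toNat

-- ===== PORT B =====
-- Source B's _fold_once: 'while len(a) >= 2: out.append(a.pop(0) + a.pop_last())'; the two pops
-- leave exactly the tail-without-its-last element, ported as (y :: rest).dropLast
def foldB_go : List Int → List Int → List Int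
  | out, x :: y :: rest =>
      foldB_go (out ++ [x + (y :: rest).getLast (by simp)]) ((y :: rest).dropLast)
  | out, a => out ++ a
termination_by _ a => a.length
decreasing_by simp [List.length_dropLast]

def foldB_once (a : List Int) : List Int := foldB_go [] a

-- Source B's driver: 'while r > 0: if len(array) < 2: break; array = _fold_once(array); r -= 1'
def foldB_loop : List Int → Nat → List Int
  | arr, 0 => arr
  | arr, Nat.succ k => if arr.length < 2 then arr else foldB_loop (foldB_once arr) k

def fold_array_alt (array : List Int) (runs : Int) : List Int :=
  foldB_loop array runs.toNat

-- ===== PRECONDITION & SPEC =====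
def Spec_fold_array (array : List Int) (runs : Int) (out : List Int) : Prop := out = fold_array_alt array runs
instance (array : List Int) (runs : Int) (out : List Int) : Decidable (Spec_fold_array array runs out) := by unfold Spec_fold_array; infer_instance

-- ===== CLAIM (what is proved, stated in full; the proofs are below) =====
def Claim_equal_fold_array : Prop := ∀ (array : List Int) (runs : Int), Dom_fold_array array runs → Spec_fold_array array runs (fold_array array runs)

-- ===== LEMMAS AND PROOFS =====

-- closed characterisation of one fold, used as the bridge between the two ports
def foldMap (arr : List Int) : List Int :=
  ((List.range (arr.length / 2)).map
      (fun i => arr.getD i 0 + arr.getD (arr.length - 1 - i) 0)) ++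
    (if arr.length % 2 ≠ 0 then [arr.getD (arr.length / 2) 0] else [])

lemma F_getD (arr : List Int) (h k : Nat) (hk : k < h) :
    ((List.range h).map (fun i => PySem.List.pyGetD arr ((i : Nat) : Int) 0)).getD k 0
      = arr.getD k 0 := by
  rw [List.getD_eq_getElem _ _ (by simpa using hk)]
  simp [PySem.List.pyGetD_natCast]

lemma S_len (arr : List Int) (h : Nat) :
    (((PySem.List.pyRange (h:Int) (arr.length:Int) 1).map (fun j => PySem.List.pyGetD arr j 0)).reverse).length
      = ((arr.length:Int) - h).toNat := by
  simp [PySem.List.length_pyRange_one]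

lemma S_getD (arr : List Int) (h k : Nat) (hh : h ≤ arr.length) (hk : k < arr.length - h) :
    (((PySem.List.pyRange (h:Int) (arr.length:Int) 1).map (fun j => PySem.List.pyGetD arr j 0)).reverse).getD k 0
      = arr.getD (arr.length - 1 - k) 0 := by
  rw [List.getD_eq_getElem _ _ (by rw [S_len arr h]; omega)]
  rw [List.getElem_reverse]
  simp only [List.getElem_map, PySem.List.getElem_pyRange_one, List.length_map,
    PySem.List.length_pyRange_one]
  have : (h:Int) + ↑(((arr.length:Int) - ↑h).toNat - 1 - k) = ((arr.length - 1 - k : Nat) : Int) := by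
    omega
  rw [this, PySem.List.pyGetD_natCast]

-- one A-iteration equals the closed characterisation
lemma stepA_eq_foldMap (arr : List Int) : foldA_step arr = foldMap arr := by
  have hm : PySem.Int.mod (arr.length : Int) 2 = (arr.length : Int) % 2 :=
    PySem.Int.mod_eq_emod_of_pos (by norm_num)
  have hd : PySem.Int.floordiv (arr.length : Int) 2 = (arr.length : Int) / 2 :=
    PySem.Int.floordiv_eq_ediv_of_pos (by norm_num)
  simp only [foldA_step, foldMap, hm, hd,
    PySem.List.foldl_append_singleton_eq_map, List.foldl_flip_cons_eq_append,
    List.append_nil, List.nil_append]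
  by_cases hpar : arr.length % 2 = 0
  · have h2 : ((arr.length : Int)) % 2 = 0 := by omega
    have h3 : ¬(arr.length % 2 ≠ 0) := by omega
    simp only [h2, ne_eq, not_true_eq_false, if_false, h3, add_zero]
    have e1 : ((arr.length : Int) / 2) = ((arr.length / 2 : Nat) : Int) := by omega
    rw [e1, S_len arr (arr.length / 2)]
    have e2 : (((((arr.length : Int) - ↑(arr.length / 2)).toNat : Nat)) : Int)
        = ((arr.length - arr.length / 2 : Nat) : Int) := by omega
    rw [e2]
    have e3 : arr.length - arr.length / 2 = arr.length / 2 := by omega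
    rw [e3, List.append_nil]
    simp only [PySem.List.pyRange_zero_nat, List.map_map, Function.comp_def]
    refine List.map_congr_left ?_
    intro k hk
    simp only [List.mem_range] at hk
    rw [PySem.List.pyGetD_natCast, PySem.List.pyGetD_natCast,
      F_getD arr _ k hk, S_getD arr (arr.length / 2) k (by omega) (by omega)]
  · have h2 : ((arr.length : Int)) % 2 = 1 := by omega
    have h3 : (arr.length % 2 ≠ 0) := by omega
    simp only [h2, ne_eq, one_ne_zero, not_false_eq_true, if_true, h3]
    have e1 : ((arr.length : Int) / 2 + 1) = ((arr.length / 2 + 1 : Nat) : Int) := by omega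
    rw [e1, S_len arr (arr.length / 2 + 1)]
    have e2 : (((((arr.length : Int) - ↑(arr.length / 2 + 1)).toNat : Nat)) : Int)
        = ((arr.length - (arr.length / 2 + 1) : Nat) : Int) := by omega
    rw [e2]
    have e3 : arr.length - (arr.length / 2 + 1) = arr.length / 2 := by omega
    rw [e3]
    simp only [PySem.List.pyRange_zero_nat, List.map_map, Function.comp_def,
      List.length_map, List.length_range]
    congr 1
    · refine List.map_congr_left ?_
      intro k hk
      simp only [List.mem_range] at hk
      rw [PySem.List.pyGetD_natCast, PySem.List.pyGetD_natCast,
        F_getD arr _ k (by omega), S_getD arr (arr.length / 2 + 1) k (by omega) (by omega)]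
    · have e4 : (((arr.length / 2 + 1 : Nat) : Int) - 1) = (((arr.length / 2 : Nat)) : Int) := by omega
      rw [e4, PySem.List.pyGetD_natCast, F_getD arr _ _ (by omega)]

-- peeling the two ends commutes with the closed characterisation
lemma foldMap_cons (x : Int) (t : List Int) (h : t ≠ []) :
    foldMap (x :: t) = (x + t.getLast h) :: foldMap t.dropLast := by
  obtain ⟨m, hlt⟩ : ∃ m, t.length = m + 1 := by
    cases t with
    | nil => exact absurd rfl h
    | cons a b => exact ⟨b.length, by simp⟩
  have hmid : (t.dropLast).length = m := by simp [hlt]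
  have hgetT : ∀ j, j < m → (t.dropLast).getD j 0 = t.getD j 0 := by
    intro j hj
    rw [List.getD_eq_getElem _ _ (by omega), List.getD_eq_getElem _ _ (by omega)]
    simp [List.getElem_dropLast]
  have hlast : t.getD m 0 = t.getLast h := by
    rw [List.getD_eq_getElem _ _ (by omega), List.getLast_eq_getElem]
    simp [hlt]
  have hcons : ∀ j, (x :: t).getD (j + 1) 0 = t.getD j 0 := by
    intro j; simp
  have hlen : (x :: t).length = m + 2 := by simp [hlt]
  have hdiv : (m + 2) / 2 = m / 2 + 1 := by omega
  simp only [foldMap, hlen, hmid, hdiv]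
  rw [List.range_succ_eq_map]
  simp only [List.map_cons, List.map_map, Function.comp_def, List.cons_append,
    Nat.succ_eq_add_one]
  have hpar : (m + 2) % 2 = m % 2 := by omega
  congr 1
  · rw [show m + 2 - 1 - 0 = m + 1 from by omega, show ((x :: t).getD 0 0) = x from by simp,
      hcons m, hlast]
  · congr 1
    · refine List.map_congr_left ?_
      intro i hi
      simp only [List.mem_range] at hi
      have e1 : m + 2 - 1 - (i + 1) = (m - 1 - i) + 1 := by omega
      rw [hcons i, e1, hcons (m - 1 - i), hgetT i (by omega), hgetT (m - 1 - i) (by omega)]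
    · rw [hpar]
      by_cases hodd : m % 2 = 0
      · simp [hodd]
      · have hm1 : 1 ≤ m := by omega
        simp only [ne_eq, hodd, not_false_eq_true, if_true]
        rw [hcons (m / 2), hgetT (m / 2) (by omega)]

lemma foldB_go_eq : ∀ (out a : List Int), foldB_go out a = out ++ foldMap a := by
  intro out a
  induction out, a using foldB_go.induct with
  | case1 out x y rest ih =>
      rw [foldB_go, foldMap_cons x (y :: rest) (by simp), ih]
      simp
  | case2 out a h =>
      cases a with
      | nil => simp [foldB_go, foldMap]
      | cons x as =>
          cases as with
          | nil => simp [foldB_go, foldMap]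
          | cons y rest => exact (h x y rest rfl).elim

lemma stepA_short (arr : List Int) (h : arr.length < 2) : foldA_step arr = arr := by
  rw [stepA_eq_foldMap]
  match arr, h with
  | [], _ => simp [foldMap]
  | [x], _ => simp [foldMap]

lemma loopA_short (arr : List Int) (k : Nat) (h : arr.length < 2) : foldA_loop arr k = arr := by
  induction k with
  | zero => rfl
  | succ k ih => rw [foldA_loop, stepA_short arr h, ih]

lemma loop_eq (k : Nat) (arr : List Int) : foldA_loop arr k = foldB_loop arr k := by
  induction k generalizing arr with
  | zero => rfl
  | succ k ih =>
      rw [foldA_loop, foldB_loop]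
      by_cases h : arr.length < 2
      · rw [if_pos h, stepA_short arr h, loopA_short _ _ h]
      · rw [if_neg h, ← ih, stepA_eq_foldMap]
        congr 1
        rw [foldB_once, foldB_go_eq]
        simp

-- ===== VERDICT (by name: the statement is the Claim_ definition above) =====
theorem fold_array_spec : Claim_equal_fold_array := by
  intro array runs _
  unfold Spec_fold_array fold_array fold_array_alt
  exact loop_eq _ _
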